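-- pv_equiv track=rewrite | github.com/ytingchou/legacy-sql-xml-analyzer | src/legacy_sql_xml_analyzer/java_bff_context.py | render_assembly_output_summary
-- ===== SOURCE A (Python) =====
-- from typing import Any
--
-- def render_assembly_output_summary(parsed: Any) -> str:
--     if not isinstance(parsed, dict):
--         return "- Missing accepted assembly output."
--     lines = ["service_logic:"]
--     for item in parsed.get("service_logic", [])[:6] if isinstance(parsed.get("service_logic"), list) else []:
--         lines.append(f"- {item}")
--     lines.append("controller_logic:")
--     for item in parsed.get("controller_logic", [])[:4] if isinstance(parsed.get("controller_logic"), list) else []: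
--         lines.append(f"- {item}")
--     lines.append("dto_contract_hints:")
--     for item in parsed.get("dto_contract_hints", [])[:4] if isinstance(parsed.get("dto_contract_hints"), list) else []:
--         lines.append(f"- {item}")
--     return "\n".join(lines)
-- ===== SOURCE B (Python) =====
-- def render_assembly_output_summary(parsed):
--     if not isinstance(parsed, dict):
--         return "- Missing accepted assembly output."
--
--     def section(field, limit):
--         text = field + ":"
--         value = parsed.get(field)
--         if isinstance(value, list):
--             for item in value[:limit]:
--                 text += "\n- " + str(item)
--         return text
--
--     def go(specs):
--         head = section(*specs[0])
--         rest = specs[1:]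
--         return head if not rest else head + "\n" + go(rest)
--
--     return go([("service_logic", 6), ("controller_logic", 4), ("dto_contract_hints", 4)])
-- ===== Notes on version B (the rewrite author's own statement) =====
-- stated objective: simpler
-- what changed: Replaces A's accumulate-a-list-of-lines-then-'\n'.join rendering by a recursion over a (field, limit) config that builds the result string directly by concatenation, one section at a time.
import Mathlib
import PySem

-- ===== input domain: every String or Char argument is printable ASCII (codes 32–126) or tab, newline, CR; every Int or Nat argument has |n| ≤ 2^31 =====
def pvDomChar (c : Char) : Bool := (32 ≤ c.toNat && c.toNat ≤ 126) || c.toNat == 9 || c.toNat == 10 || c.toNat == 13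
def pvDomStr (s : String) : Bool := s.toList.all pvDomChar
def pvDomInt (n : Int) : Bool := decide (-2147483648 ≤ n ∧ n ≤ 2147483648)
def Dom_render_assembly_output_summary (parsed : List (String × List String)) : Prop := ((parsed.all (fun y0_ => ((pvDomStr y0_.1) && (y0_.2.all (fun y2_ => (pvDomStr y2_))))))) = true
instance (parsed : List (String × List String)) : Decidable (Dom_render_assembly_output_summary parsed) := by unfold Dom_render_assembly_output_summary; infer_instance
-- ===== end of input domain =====

-- B replaces A's lines-list-then-join rendering by a recursion over the (field, limit)
-- config that builds the string directly by concatenation (objective: simpler decomposition).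

-- ===== PORT A =====
-- The Lean type fixes parsed to a str -> list[str] dict, so the isinstance guards
-- always take the dict/list branch; parsed.get(f, [])[:6] is ported exactly as a
-- match on Dict.get? with List.take (the slice bound is a nonnegative literal).
def render_assembly_output_summary (parsed : List (String × List String)) : String :=
  let lines := ["service_logic:"]
  let lines := (match (PySem.Dict.mk parsed).get? "service_logic" with
    | some (v : List String) => v.take 6
    | none => []).foldl (fun acc item => acc ++ [PySem.Str.join "" ["- ", item]]) lines
  let lines := lines ++ ["controller_logic:"]
  let lines := (match (PySem.Dict.mk parsed).get? "controller_logic" with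
    | some (v : List String) => v.take 4
    | none => []).foldl (fun acc item => acc ++ [PySem.Str.join "" ["- ", item]]) lines
  let lines := lines ++ ["dto_contract_hints:"]
  let lines := (match (PySem.Dict.mk parsed).get? "dto_contract_hints" with
    | some (v : List String) => v.take 4
    | none => []).foldl (fun acc item => acc ++ [PySem.Str.join "" ["- ", item]]) lines
  PySem.Str.join "\n" lines

-- ===== PORT B =====
-- section(field, limit): header string, then '\n- item' appended per taken item.
def pvSection (parsed : List (String × List String)) (field : String) (limit : Nat) : String :=
  let text := PySem.Str.join "" [field, ":"]
  match (PySem.Dict.mk parsed).get? field with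
  | some (v : List String) => (v.take limit).foldl (fun t item => PySem.Str.join "" [t, "\n- ", item]) text
  | none => text

-- go(specs): head section, then '\n' + recursive rendering of the remaining specs.
def pvGo (parsed : List (String × List String)) : List (String × Nat) → String
  | [] => ""          -- unreachable: go is only called on nonempty spec lists
  | p :: rest =>
    let head := pvSection parsed p.1 p.2
    match rest with
    | [] => head
    | _ :: _ => PySem.Str.join "" [head, "\n", pvGo parsed rest]

def render_assembly_output_summary_alt (parsed : List (String × List String)) : String :=
  pvGo parsed [("service_logic", 6), ("controller_logic", 4), ("dto_contract_hints", 4)]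

-- ===== PRECONDITION & SPEC =====
def Spec_render_assembly_output_summary (parsed : List (String × List String)) (out : String) : Prop := out = render_assembly_output_summary_alt parsed
instance (parsed : List (String × List String)) (out : String) : Decidable (Spec_render_assembly_output_summary parsed out) := by unfold Spec_render_assembly_output_summary; infer_instance

-- ===== CLAIM (what is proved, stated in full; the proofs are below) =====
def Claim_equal_render_assembly_output_summary : Prop := ∀ (parsed : List (String × List String)), Dom_render_assembly_output_summary parsed → Spec_render_assembly_output_summary parsed (render_assembly_output_summary parsed)

-- ===== LEMMAS AND PROOFS =====

-- the lines one field contributes in A, on the List Char side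
def pvLines (parsed : List (String × List String)) (field : String) (limit : Nat) : List (List Char) :=
  (field.toList ++ [':']) ::
    (match (PySem.Dict.mk parsed).get? field with
     | some (v : List String) => v.take limit
     | none => []).map (fun (i : String) => '-' :: ' ' :: i.toList)

-- foldl of the '\n- '-appending step pulls a common prefix out of the accumulator
theorem pv_foldl_prefix (rest : List (List Char)) (p h : List Char) :
    rest.foldl (fun t i => t ++ ('\n' :: '-' :: ' ' :: i)) (p ++ h)
      = p ++ rest.foldl (fun t i => t ++ ('\n' :: '-' :: ' ' :: i)) h := by
  induction rest generalizing h with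
  | nil => rfl
  | cons a rest ih =>
    simp only [List.foldl_cons, List.append_assoc]
    exact ih (h ++ ('\n' :: '-' :: ' ' :: a))

-- a '\n'-joined block (header :: '- item' lines) equals B's section accumulation
theorem pv_sec (items : List (List Char)) (h : List Char) :
    PySem.Chars.join ['\n'] (h :: items.map (fun i => '-' :: ' ' :: i))
      = items.foldl (fun t i => t ++ ('\n' :: '-' :: ' ' :: i)) h := by
  induction items generalizing h with
  | nil => exact PySem.Chars.join_singleton _ _
  | cons a items ih =>
    simp only [List.map_cons, PySem.Chars.join_cons_cons, List.foldl_cons]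
    rw [ih ('-' :: ' ' :: a)]
    rw [show (h ++ ('\n' :: '-' :: ' ' :: a)) = (h ++ ['\n']) ++ ('-' :: ' ' :: a) by
      simp]
    rw [pv_foldl_prefix items (h ++ ['\n']) ('-' :: ' ' :: a)]

-- splitting a '\n'-join at a block boundary (both sides nonempty by shape)
theorem pv_split (x : List Char) (xs : List (List Char)) (y : List Char) (ys : List (List Char)) :
    PySem.Chars.join ['\n'] ((x :: xs) ++ y :: ys)
      = PySem.Chars.join ['\n'] (x :: xs) ++ ['\n'] ++ PySem.Chars.join ['\n'] (y :: ys) := by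
  induction xs generalizing x with
  | nil => simp [PySem.Chars.join_cons_cons, PySem.Chars.join_singleton]
  | cons a xs ih =>
    simp only [List.cons_append, PySem.Chars.join_cons_cons]
    rw [show a :: (xs ++ y :: ys) = (a :: xs) ++ y :: ys from rfl, ih a]
    simp

-- the three-block split used by the verdict proof
theorem pv_three (h1 h2 h3 : List Char) (w1 w2 w3 : List (List Char)) :
    PySem.Chars.join ['\n'] ((h1 :: w1) ++ ((h2 :: w2) ++ (h3 :: w3)))
      = PySem.Chars.join ['\n'] (h1 :: w1)
          ++ ('\n' :: (PySem.Chars.join ['\n'] (h2 :: w2)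
          ++ ('\n' :: PySem.Chars.join ['\n'] (h3 :: w3)))) := by
  rw [show h1 :: w1 ++ (h2 :: w2 ++ h3 :: w3) = (h1 :: w1) ++ (h2 :: (w2 ++ h3 :: w3)) by simp,
      pv_split,
      show h2 :: (w2 ++ h3 :: w3) = (h2 :: w2) ++ (h3 :: w3) by simp, pv_split]
  simp

-- literal-string bridges (definitional)
theorem pv_nl : ("\n" : String).toList = ['\n'] := rfl
theorem pv_empty : ("" : String).toList = [] := rfl
theorem pv_h1 : ("service_logic:" : String).toList = "service_logic".toList ++ [':'] := rfl
theorem pv_h2 : ("controller_logic:" : String).toList = "controller_logic".toList ++ [':'] := rfl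
theorem pv_h3 : ("dto_contract_hints:" : String).toList = "dto_contract_hints".toList ++ [':'] := rfl

-- A's '- item' lines on the List Char side
theorem pv_mapA (l : List String) :
    (l.map (fun x => PySem.Str.join "" ["- ", x])).map String.toList
      = l.map (fun (i : String) => '-' :: ' ' :: i.toList) := by
  rw [List.map_map]
  apply List.map_congr_left
  intro a _
  simp [PySem.Str.toList_join, PySem.Chars.join_cons_cons, PySem.Chars.join_singleton]

-- strings foldl of B's section step, converted to the List Char side
theorem pv_sec_chars (items : List String) (t : String) :
    (items.foldl (fun t item => PySem.Str.join "" [t, "\n- ", item]) t).toList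
      = (items.map String.toList).foldl (fun t i => t ++ ('\n' :: '-' :: ' ' :: i)) t.toList := by
  induction items generalizing t with
  | nil => rfl
  | cons a items ih =>
    simp only [List.foldl_cons, List.map_cons, ih]
    congr 1
    simp [PySem.Str.toList_join, PySem.Chars.join_cons_cons, PySem.Chars.join_singleton]

-- one section of B equals the '\n'-join of that field's lines
theorem pv_block (parsed : List (String × List String)) (field : String) (limit : Nat) :
    (pvSection parsed field limit).toList = PySem.Chars.join ['\n'] (pvLines parsed field limit) := by
  unfold pvSection pvLines
  rcases (PySem.Dict.mk parsed).get? field with _ | v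
  · simp [PySem.Chars.join_singleton, PySem.Str.toList_join, PySem.Chars.join_cons_cons]
  · rw [pv_sec_chars,
       show (fun (i : String) => '-' :: ' ' :: i.toList)
          = (fun i => '-' :: ' ' :: i) ∘ String.toList from rfl,
       ← List.map_map, pv_sec]
    congr 1
    simp [PySem.Str.toList_join, PySem.Chars.join_cons_cons, PySem.Chars.join_singleton]

-- ===== VERDICT (by name: the statement is the Claim_ definition above) =====
theorem render_assembly_output_summary_spec : Claim_equal_render_assembly_output_summary := by
  intro parsed _
  unfold Spec_render_assembly_output_summary
  apply String.toList_inj.mp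
  unfold render_assembly_output_summary render_assembly_output_summary_alt pvGo
  simp only [PySem.List.foldl_append_singleton_eq_map, pvGo]
  simp only [PySem.Str.toList_join, List.map_append, List.map_cons, List.map_nil]
  rw [pv_block, pv_block, pv_block]
  simp only [pv_mapA, pv_nl, pv_empty, pv_h1, pv_h2, pv_h3, pvLines,
    List.cons_append, List.append_assoc, List.nil_append,
    PySem.Chars.join_cons_cons, PySem.Chars.join_singleton]
  exact pv_three _ _ _ _ _ _
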